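-- pv_equiv track=rewrite | github.com/kjb4494/baekjoon | 2023/Silver/2161.py | solve
-- ===== SOURCE A (Python) =====
-- def solve(n):
--     num_list = [i for i in range(n)]
--     discard_this_turn = True
--     result = []
--
--     while len(num_list) != 0:
--         if discard_this_turn:
--             result.append(num_list.pop(0) + 1)
--             discard_this_turn = not discard_this_turn
--         else:
--             num_list.append(num_list.pop(0))
--             discard_this_turn = not discard_this_turn
--
--     return " ".join(map(str, result))
-- ===== SOURCE B (Python) =====
-- def solve(n):
--     cur = list(range(n))
--     t = True
--     result = []
--     while cur:
--         survivors = []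
--         for x in cur:
--             if t:
--                 result.append(x + 1)
--             else:
--                 survivors.append(x)
--             t = not t
--         cur = survivors
--     return " ".join(map(str, result))
-- ===== Notes on version B (the rewrite author's own statement) =====
-- stated objective: faster
-- what changed: Replaces the single rotating queue (pop(0)/append one element per step) with repeated filtering passes over the list carrying a persistent discard/keep toggle across passes, so each element is touched O(1) times per pass and pass sizes halve.
import Mathlib
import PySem

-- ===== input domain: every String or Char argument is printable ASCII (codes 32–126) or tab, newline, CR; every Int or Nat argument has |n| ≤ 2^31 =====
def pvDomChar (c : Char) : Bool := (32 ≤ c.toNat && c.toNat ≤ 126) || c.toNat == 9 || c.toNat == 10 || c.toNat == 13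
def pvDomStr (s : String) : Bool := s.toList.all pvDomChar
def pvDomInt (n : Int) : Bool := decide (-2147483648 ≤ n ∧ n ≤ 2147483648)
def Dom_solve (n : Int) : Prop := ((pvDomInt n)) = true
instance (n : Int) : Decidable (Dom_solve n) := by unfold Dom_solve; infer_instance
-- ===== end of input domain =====

-- B replaces A's single rotating queue with repeated filtering passes carrying a persistent toggle (alternative decomposition, same results).


-- ===== PORT A =====
-- A's while loop: state (num_list, discard_this_turn, result); one element handled per iteration.
def loopA : List Int → Bool → List Int → List Int
  | [], _, acc => acc
  | x :: xs, true, acc => loopA xs false (acc ++ [x + 1])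
  | x :: xs, false, acc => loopA (xs ++ [x]) true acc
termination_by l t _ => 2 * l.length + (if t then 0 else 1)
decreasing_by all_goals (simp; try omega)

def solve (n : Int) : String :=
  PySem.Str.join " " ((loopA (PySem.List.pyRange 0 n 1) true []).map PySem.Int.toStr)

-- ===== PORT B =====
-- B's inner for-loop over one pass: appends discards to result, keeps survivors, flips t each element.
def passB : List Int → Bool → List Int → List Int → (List Int × List Int × Bool)
  | [], t, res, sur => (res, sur, t)
  | x :: xs, t, res, sur =>
      if t then passB xs (!t) (res ++ [x + 1]) sur
      else passB xs (!t) res (sur ++ [x])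

-- termination measure for B's outer loop (needed by loopB's decreasing_by, so it stays above)
theorem passB_measure : ∀ (l : List Int) (t : Bool) (res sur : List Int),
    2 * (passB l t res sur).2.1.length + (if (passB l t res sur).2.2 then 0 else 1)
      + (if l = [] then 0 else 1)
      ≤ 2 * sur.length + 2 * l.length + (if t then 0 else 1) := by
  intro l
  induction l with
  | nil => intro t res sur; cases t <;> simp [passB]
  | cons x xs ih =>
    intro t res sur
    cases t with
    | true =>
      have h := ih false (res ++ [x + 1]) sur
      simp [passB] at h ⊢
      split_ifs at h ⊢ <;> omega
    | false =>
      have h := ih true res (sur ++ [x])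
      simp [passB] at h ⊢
      split_ifs at h ⊢ <;> omega

-- B's while loop: run one pass, replace the list by the survivors, carry t over.
def loopB (l : List Int) (t : Bool) (res : List Int) : List Int :=
  if h : l = [] then res
  else
    let p := passB l t res []
    loopB p.2.1 p.2.2 p.1
termination_by 2 * l.length + (if t then 0 else 1)
decreasing_by
  have := passB_measure l t res []
  simp [h] at this; omega

def solve_alt (n : Int) : String :=
  PySem.Str.join " " ((loopB (PySem.List.pyRange 0 n 1) true []).map PySem.Int.toStr)

-- ===== PRECONDITION & SPEC =====
def Spec_solve (n : Int) (out : String) : Prop := out = solve_alt n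
instance (n : Int) (out : String) : Decidable (Spec_solve n out) := by unfold Spec_solve; infer_instance

-- ===== CLAIM (what is proved, stated in full; the proofs are below) =====
def Claim_equal_solve : Prop := ∀ (n : Int), Dom_solve n → Spec_solve n (solve n)

-- ===== LEMMAS AND PROOFS =====

-- Invariant: A's queue is "remaining of this pass ++ survivors so far"; one whole pass of A equals passB.
theorem loopA_pass : ∀ (l : List Int) (t : Bool) (acc sur : List Int),
    loopA (l ++ sur) t acc =
      loopA (passB l t acc sur).2.1 (passB l t acc sur).2.2 (passB l t acc sur).1 := by
  intro l
  induction l with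
  | nil => intro t acc sur; simp [passB]
  | cons x xs ih =>
    intro t acc sur
    cases t with
    | true =>
      simp only [List.cons_append, loopA, passB]
      simpa using ih false (acc ++ [x + 1]) sur
    | false =>
      simp only [List.cons_append, loopA, passB]
      have := ih true acc (sur ++ [x])
      simpa [List.append_assoc] using this

theorem loopA_eq_loopB : ∀ (m : Nat) (l : List Int) (t : Bool) (acc : List Int),
    2 * l.length + (if t then 0 else 1) ≤ m → loopA l t acc = loopB l t acc := by
  intro m
  induction m with
  | zero =>
    intro l t acc h
    cases l with
    | nil => cases t <;> simp [loopA, loopB]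
    | cons x xs => cases t <;> simp at h
  | succ k ih =>
    intro l t acc h
    by_cases hl : l = []
    · subst hl; cases t <;> simp [loopA, loopB]
    · rw [loopB]
      simp only [hl, dite_false]
      have hp := loopA_pass l t acc []
      rw [List.append_nil] at hp
      rw [hp]
      have hm := passB_measure l t acc []
      simp [hl] at hm
      exact ih _ _ _ (by omega)

-- ===== VERDICT (by name: the statement is the Claim_ definition above) =====
theorem solve_spec : Claim_equal_solve := by
  intro n _
  unfold Spec_solve solve solve_alt
  rw [loopA_eq_loopB (2 * (PySem.List.pyRange 0 n 1).length + 1) _ _ _ (by split_ifs <;> omega)]
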